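-- pv_equiv track=rewrite | github.com/S-Christensen/cartographersStudy | spring/midgameEvaluation.py | canalLake_progress
-- ===== SOURCE A (Python) =====
-- def canalLake_progress(grid):
--     points = 0
--     rows, cols = len(grid), len(grid[0])
--
--     for r in range(rows):
--         for c in range(cols):
--             if grid[r][c] in ("Water", "Farm"):
--                 target = "Farm" if grid[r][c] == "Water" else "Water"
--                 for dr, dc in [(1,0), (-1,0), (0,1), (0,-1)]:
--                     nr, nc = r + dr, c + dc
--                     if 0 <= nr < rows and 0 <= nc < cols and grid[nr][nc] == target:
--                         points += 1
--                         break
--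
--     return points
-- ===== SOURCE B (Python) =====
-- def canalLake_progress(grid):
--     rows, cols = len(grid), len(grid[0])
--     qualifying = set()
--     for r in range(rows):
--         for c in range(cols):
--             for nr, nc in ((r, c + 1), (r + 1, c)):
--                 if nr < rows and nc < cols and _opposite(grid[r][c], grid[nr][nc]):
--                     qualifying.add((r, c))
--                     qualifying.add((nr, nc))
--     return len(qualifying)
--
--
-- def _opposite(a, b):
--     return (a == "Water" and b == "Farm") or (a == "Farm" and b == "Water")
-- ===== Notes on version B (the rewrite author's own statement) =====
-- stated objective: alternative
-- what changed: Instead of probing all four neighbours of every Water/Farm cell with a break, B scans each horizontal/vertical adjacency edge once (right and down neighbour only) and collects the endpoints of Water-Farm edges into a set, returning its size.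
import Mathlib
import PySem

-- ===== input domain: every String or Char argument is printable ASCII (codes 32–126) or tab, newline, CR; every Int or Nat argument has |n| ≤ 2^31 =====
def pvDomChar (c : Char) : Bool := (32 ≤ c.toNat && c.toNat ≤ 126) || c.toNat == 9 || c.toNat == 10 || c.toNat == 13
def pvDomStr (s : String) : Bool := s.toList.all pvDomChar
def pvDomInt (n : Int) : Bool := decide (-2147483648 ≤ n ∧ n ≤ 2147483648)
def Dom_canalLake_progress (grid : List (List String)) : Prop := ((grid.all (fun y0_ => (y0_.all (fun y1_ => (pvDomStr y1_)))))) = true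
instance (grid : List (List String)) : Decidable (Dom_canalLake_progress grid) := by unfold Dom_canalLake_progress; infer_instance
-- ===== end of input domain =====

-- B replaces A's per-cell four-neighbour probe (with break) by a single scan of right/down
-- adjacency edges that collects endpoints of Water-Farm edges into a set; same cost, alternative algorithm.


-- ===== PORT A =====
-- grid[r][c] for nonnegative in-range indices (all accesses are guarded inside Pre_)
def pvAt (grid : List (List String)) (r c : Nat) : String := (grid.getD r []).getD c ""

-- the inner 'for dr, dc in [...] : … break' loop: true iff some in-bounds neighbour equals target
def pvNbrLoop (grid : List (List String)) (rows cols : Nat) (r c : Nat) (target : String) :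
    List (Int × Int) → Bool
  | [] => false
  | (dr, dc) :: rest =>
    let nr : Int := (r : Int) + dr
    let nc : Int := (c : Int) + dc
    if 0 ≤ nr ∧ nr < (rows : Int) ∧ 0 ≤ nc ∧ nc < (cols : Int) ∧
        pvAt grid nr.toNat nc.toNat = target then true
    else pvNbrLoop grid rows cols r c target rest

def canalLake_progress (grid : List (List String)) : Int :=
  let rows := grid.length
  let cols := (grid.headD []).length   -- len(grid[0]); Pre_ excludes the empty grid (IndexError)
  (List.range rows).foldl (fun pts r =>
    (List.range cols).foldl (fun pts c =>
      let cell := pvAt grid r c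
      if cell = "Water" ∨ cell = "Farm" then
        let target := if cell = "Water" then "Farm" else "Water"
        if pvNbrLoop grid rows cols r c target [(1, 0), (-1, 0), (0, 1), (0, -1)] then pts + 1
        else pts
      else pts) pts) (0 : Int)

-- ===== PORT B =====
def pvOpp (a b : String) : Bool := (a == "Water" && b == "Farm") || (a == "Farm" && b == "Water")

-- the inner 'for nr, nc in ((r, c+1), (r+1, c))' loop body over the two edges
def pvEdgeStep (grid : List (List String)) (rows cols : Nat) (r c : Nat)
    (s : PySem.Set (Nat × Nat)) : PySem.Set (Nat × Nat) :=
  [(r, c + 1), (r + 1, c)].foldl (fun s p =>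
    if p.1 < rows ∧ p.2 < cols ∧ pvOpp (pvAt grid r c) (pvAt grid p.1 p.2) then
      (s.add (r, c)).add p
    else s) s

def canalLake_progress_alt (grid : List (List String)) : Int :=
  let rows := grid.length
  let cols := (grid.headD []).length   -- len(grid[0]); Pre_ excludes the empty grid (IndexError)
  let qualifying : PySem.Set (Nat × Nat) :=
    (List.range rows).foldl (fun s r =>
      (List.range cols).foldl (fun s c => pvEdgeStep grid rows cols r c s) s) PySem.Set.empty
  (PySem.Set.len qualifying : Int)

-- ===== PRECONDITION & SPEC =====
-- Pre_ excludes exactly the inputs on which the Python A raises IndexError: the empty grid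
-- (len(grid[0])) and grids with a row shorter than the first row (grid[r][c] with c < cols).
def Pre_canalLake_progress (grid : List (List String)) : Prop :=
  grid ≠ [] ∧ ∀ row ∈ grid, (grid.headD []).length ≤ row.length
instance (grid : List (List String)) : Decidable (Pre_canalLake_progress grid) := by
  unfold Pre_canalLake_progress; infer_instance
def pvWitness_canalLake_progress : List (List String) :=
  [["Water", "Farm"], ["Sea", "Farm"]]
def Spec_canalLake_progress (grid : List (List String)) (out : Int) : Prop := out = canalLake_progress_alt grid
instance (grid : List (List String)) (out : Int) : Decidable (Spec_canalLake_progress grid out) := by unfold Spec_canalLake_progress; infer_instance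

-- ===== CLAIM (what is proved, stated in full; the proofs are below) =====
def Claim_equal_canalLake_progress : Prop := ∀ (grid : List (List String)), Dom_canalLake_progress grid → Pre_canalLake_progress grid → Spec_canalLake_progress grid (canalLake_progress grid)

-- ===== LEMMAS AND PROOFS =====

-- the qualifying predicate both programs count: a Water/Farm cell with an opposite in-bounds neighbour
def pvQ (grid : List (List String)) (rows cols r c : Nat) : Bool :=
  let cell := pvAt grid r c
  (cell == "Water" || cell == "Farm") &&
    pvNbrLoop grid rows cols r c (if cell == "Water" then "Farm" else "Water")
      [(1, 0), (-1, 0), (0, 1), (0, -1)]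

-- the cells of the scanned rectangle
def pvCells (rows cols : Nat) : List (Nat × Nat) :=
  (List.range rows).flatMap (fun r => (List.range cols).map (fun c => (r, c)))

-- p is an endpoint of a Water-Farm edge scanned at cell (r,c)
def pvEdgeHit (grid : List (List String)) (rows cols : Nat) (r c : Nat) (p : Nat × Nat) : Prop :=
  (c + 1 < cols ∧ pvOpp (pvAt grid r c) (pvAt grid r (c + 1)) ∧ (p = (r, c) ∨ p = (r, c + 1)))
  ∨ (r + 1 < rows ∧ pvOpp (pvAt grid r c) (pvAt grid (r + 1) c) ∧ (p = (r, c) ∨ p = (r + 1, c)))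

theorem pvFoldl_count {α : Type} (P : α → Bool) (l : List α) (n : Int) :
    l.foldl (fun acc x => if P x then acc + 1 else acc) n = n + (l.countP P : Int) := by
  induction l generalizing n with
  | nil => simp
  | cons x xs ih =>
    simp only [List.foldl_cons, List.countP_cons, ih]
    by_cases h : P x <;> simp [h] <;> ring

theorem pvFoldl_flatMap {α β γ : Type} (f : γ → α → γ) (g : β → List α) (l : List β) (a : γ) :
    (l.flatMap g).foldl f a = l.foldl (fun a x => (g x).foldl f a) a := by
  induction l generalizing a with
  | nil => rfl
  | cons x xs ih => simp [List.flatMap_cons, List.foldl_append, ih]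

theorem pvA_eq_count (grid : List (List String)) :
    canalLake_progress grid =
      ((pvCells grid.length (grid.headD []).length).countP
        (fun p => pvQ grid grid.length (grid.headD []).length p.1 p.2) : Int) := by
  have h1 : canalLake_progress grid
      = (pvCells grid.length (grid.headD []).length).foldl
          (fun acc p => if pvQ grid grid.length (grid.headD []).length p.1 p.2 then acc + 1
            else acc) 0 := by
    unfold canalLake_progress pvCells
    rw [pvFoldl_flatMap]
    simp only [List.foldl_map]
    refine PySem.List.foldl_congr_mem _ _ _ _ ?_
    intro acc r _
    refine PySem.List.foldl_congr_mem _ _ _ _ ?_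
    intro acc c _
    simp only [pvQ]
    by_cases hw : pvAt grid r c = "Water" <;> by_cases hf : pvAt grid r c = "Farm" <;>
      simp [hw, hf]
  rw [h1, pvFoldl_count]
  simp

-- characterisation of the four-neighbour break loop
theorem pvNbrLoop_char (grid : List (List String)) (rows cols r c : Nat) (t : String) :
    pvNbrLoop grid rows cols r c t [(1, 0), (-1, 0), (0, 1), (0, -1)] = true ↔
      (r + 1 < rows ∧ c < cols ∧ pvAt grid (r + 1) c = t)
      ∨ (1 ≤ r ∧ r - 1 < rows ∧ c < cols ∧ pvAt grid (r - 1) c = t)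
      ∨ (r < rows ∧ c + 1 < cols ∧ pvAt grid r (c + 1) = t)
      ∨ (r < rows ∧ 1 ≤ c ∧ c - 1 < cols ∧ pvAt grid r (c - 1) = t) := by
  simp only [pvNbrLoop]
  rw [show ((r : Int) + 1).toNat = r + 1 by omega, show ((r : Int) + -1).toNat = r - 1 by omega,
    show ((c : Int) + 1).toNat = c + 1 by omega, show ((c : Int) + -1).toNat = c - 1 by omega,
    show ((r : Int) + 0).toNat = r by omega, show ((c : Int) + 0).toNat = c by omega]
  split_ifs with h1 h2 h3 h4
  · exact iff_of_true rfl (Or.inl ⟨by omega, by omega, h1.2.2.2.2⟩)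
  · exact iff_of_true rfl (Or.inr (Or.inl ⟨by omega, by omega, by omega, h2.2.2.2.2⟩))
  · exact iff_of_true rfl (Or.inr (Or.inr (Or.inl ⟨by omega, by omega, h3.2.2.2.2⟩)))
  · exact iff_of_true rfl (Or.inr (Or.inr (Or.inr ⟨by omega, by omega, by omega, h4.2.2.2.2⟩)))
  · refine iff_of_false (by simp) ?_
    rintro (⟨ha, hb, hat⟩ | ⟨ha, hb, hc', hat⟩ | ⟨ha, hb, hat⟩ | ⟨ha, hb, hc', hat⟩)
    · exact h1 ⟨by omega, by omega, by omega, by omega, hat⟩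
    · exact h2 ⟨by omega, by omega, by omega, by omega, hat⟩
    · exact h3 ⟨by omega, by omega, by omega, by omega, hat⟩
    · exact h4 ⟨by omega, by omega, by omega, by omega, hat⟩

theorem pvMem_edgeStep (grid : List (List String)) (rows cols r c : Nat)
    (hr : r < rows) (hc : c < cols) (s : PySem.Set (Nat × Nat)) (q : Nat × Nat) :
    q ∈ pvEdgeStep grid rows cols r c s ↔ q ∈ s ∨ pvEdgeHit grid rows cols r c q := by
  unfold pvEdgeStep pvEdgeHit
  simp only [List.foldl_cons, List.foldl_nil]
  split_ifs with h1 h2 h2 <;> (try simp only [PySem.Set.mem_add]) <;> tauto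

theorem pvEdgeStep_nodup (grid : List (List String)) (rows cols r c : Nat)
    (s : PySem.Set (Nat × Nat)) (h : s.Nodup) : (pvEdgeStep grid rows cols r c s).Nodup := by
  unfold pvEdgeStep
  simp only [List.foldl_cons, List.foldl_nil]
  split_ifs <;> first
    | exact h
    | exact PySem.Set.nodup_add _ _ (PySem.Set.nodup_add _ _ h)
    | exact PySem.Set.nodup_add _ _ (PySem.Set.nodup_add _ _ (PySem.Set.nodup_add _ _ (PySem.Set.nodup_add _ _ h)))

theorem pvMem_inner (grid : List (List String)) (rows cols r : Nat) (hr : r < rows)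
    (l : List Nat) (hl : ∀ c ∈ l, c < cols) (s : PySem.Set (Nat × Nat)) (q : Nat × Nat) :
    q ∈ l.foldl (fun s c => pvEdgeStep grid rows cols r c s) s ↔
      q ∈ s ∨ ∃ c ∈ l, pvEdgeHit grid rows cols r c q := by
  induction l generalizing s with
  | nil => simp
  | cons x xs ih =>
    simp only [List.foldl_cons]
    rw [ih (fun c hc => hl c (List.mem_cons_of_mem _ hc)),
      pvMem_edgeStep grid rows cols r x hr (hl x (List.mem_cons_self)) s q]
    simp only [List.mem_cons]
    constructor
    · rintro ((h | h) | ⟨c, hc, h⟩)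
      · exact Or.inl h
      · exact Or.inr ⟨x, Or.inl rfl, h⟩
      · exact Or.inr ⟨c, Or.inr hc, h⟩
    · rintro (h | ⟨c, (rfl | hc), h⟩)
      · exact Or.inl (Or.inl h)
      · exact Or.inl (Or.inr h)
      · exact Or.inr ⟨c, hc, h⟩

theorem pvMem_scan (grid : List (List String)) (rows cols : Nat) (q : Nat × Nat) :
    q ∈ (List.range rows).foldl (fun s r =>
        (List.range cols).foldl (fun s c => pvEdgeStep grid rows cols r c s) s)
        (PySem.Set.empty : PySem.Set (Nat × Nat)) ↔
      ∃ r < rows, ∃ c < cols, pvEdgeHit grid rows cols r c q := by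
  have gen : ∀ (l : List Nat), (∀ r ∈ l, r < rows) → ∀ s : PySem.Set (Nat × Nat),
      (q ∈ l.foldl (fun s r =>
          (List.range cols).foldl (fun s c => pvEdgeStep grid rows cols r c s) s) s ↔
        q ∈ s ∨ ∃ r ∈ l, ∃ c < cols, pvEdgeHit grid rows cols r c q) := by
    intro l hl
    induction l with
    | nil => simp
    | cons x xs ih =>
      intro s
      simp only [List.foldl_cons]
      rw [ih (fun r hr => hl r (List.mem_cons_of_mem _ hr)),
        pvMem_inner grid rows cols x (hl x List.mem_cons_self) (List.range cols)
          (fun c hc => List.mem_range.mp hc) s q]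
      simp only [List.mem_cons]
      constructor
      · rintro ((h | ⟨c, hc, h⟩) | ⟨r, hr, hrest⟩)
        · exact Or.inl h
        · exact Or.inr ⟨x, Or.inl rfl, c, List.mem_range.mp hc, h⟩
        · exact Or.inr ⟨r, Or.inr hr, hrest⟩
      · rintro (h | ⟨r, (rfl | hr), hrest⟩)
        · exact Or.inl (Or.inl h)
        · obtain ⟨c, hc, h⟩ := hrest
          exact Or.inl (Or.inr ⟨c, List.mem_range.mpr hc, h⟩)
        · exact Or.inr ⟨r, hr, hrest⟩
  rw [gen (List.range rows) (fun r hr => List.mem_range.mp hr) PySem.Set.empty]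
  simp [PySem.Set.empty]

theorem pvScan_nodup (grid : List (List String)) (rows cols : Nat) :
    ((List.range rows).foldl (fun s r =>
        (List.range cols).foldl (fun s c => pvEdgeStep grid rows cols r c s) s)
        (PySem.Set.empty : PySem.Set (Nat × Nat))).Nodup := by
  have inner : ∀ (l : List Nat) (r : Nat) (s : PySem.Set (Nat × Nat)), s.Nodup →
      (l.foldl (fun s c => pvEdgeStep grid rows cols r c s) s).Nodup := by
    intro l r
    induction l with
    | nil => intro s h; exact h
    | cons x xs ih =>
      intro s h
      exact ih _ (pvEdgeStep_nodup grid rows cols r x s h)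
  have outer : ∀ (l : List Nat) (s : PySem.Set (Nat × Nat)), s.Nodup →
      (l.foldl (fun s r =>
        (List.range cols).foldl (fun s c => pvEdgeStep grid rows cols r c s) s) s).Nodup := by
    intro l
    induction l with
    | nil => intro s h; exact h
    | cons x xs ih =>
      intro s h
      exact ih _ (inner _ x s h)
  exact outer _ _ List.nodup_nil

theorem pvCells_nodup (rows cols : Nat) : (pvCells rows cols).Nodup := by
  have : pvCells rows cols = (List.range rows) ×ˢ (List.range cols) := rfl
  rw [this]
  exact List.Nodup.product (List.nodup_range) (List.nodup_range)

theorem pvMem_cells (rows cols : Nat) (p : Nat × Nat) :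
    p ∈ pvCells rows cols ↔ p.1 < rows ∧ p.2 < cols := by
  unfold pvCells
  simp only [List.mem_flatMap, List.mem_map, List.mem_range]
  constructor
  · rintro ⟨r, hr, c, hc, rfl⟩; exact ⟨hr, hc⟩
  · rintro ⟨h1, h2⟩; exact ⟨p.1, h1, ⟨p.2, h2, rfl⟩⟩

theorem pvOpp_iff (x y : String) :
    pvOpp x y = true ↔ (x = "Water" ∧ y = "Farm") ∨ (x = "Farm" ∧ y = "Water") := by
  simp [pvOpp]

theorem pvHit_iff_Q (grid : List (List String)) (rows cols : Nat) (q : Nat × Nat) :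
    (∃ r < rows, ∃ c < cols, pvEdgeHit grid rows cols r c q) ↔
      (q.1 < rows ∧ q.2 < cols ∧ pvQ grid rows cols q.1 q.2) := by
  obtain ⟨a, b⟩ := q
  constructor
  · rintro ⟨r, hr, c, hc, hit⟩
    rcases hit with ⟨hcc, hopp, heq | heq⟩ | ⟨hrr, hopp, heq | heq⟩ <;>
      rw [pvOpp_iff] at hopp <;>
      (obtain ⟨rfl, rfl⟩ := Prod.mk.inj heq) <;>
      rcases hopp with ⟨hx, hy⟩ | ⟨hx, hy⟩
    -- right edge, endpoint (r,c), cell Water / Farm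
    · exact ⟨hr, hc, by
        simp [pvQ, hx]
        rw [pvNbrLoop_char]
        exact Or.inr (Or.inr (Or.inl ⟨hr, hcc, hy⟩))⟩
    · exact ⟨hr, hc, by
        simp [pvQ, hx]
        rw [pvNbrLoop_char]
        exact Or.inr (Or.inr (Or.inl ⟨hr, hcc, hy⟩))⟩
    -- right edge, endpoint (r,c+1), cell Farm / Water
    · exact ⟨hr, hcc, by
        simp [pvQ, hy]
        rw [pvNbrLoop_char]
        refine Or.inr (Or.inr (Or.inr ⟨hr, by omega, by omega, ?_⟩))
        rw [Nat.add_sub_cancel]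
        exact hx⟩
    · exact ⟨hr, hcc, by
        simp [pvQ, hy]
        rw [pvNbrLoop_char]
        refine Or.inr (Or.inr (Or.inr ⟨hr, by omega, by omega, ?_⟩))
        rw [Nat.add_sub_cancel]
        exact hx⟩
    -- down edge, endpoint (r,c), cell Water / Farm
    · exact ⟨hr, hc, by
        simp [pvQ, hx]
        rw [pvNbrLoop_char]
        exact Or.inl ⟨hrr, hc, hy⟩⟩
    · exact ⟨hr, hc, by
        simp [pvQ, hx]
        rw [pvNbrLoop_char]
        exact Or.inl ⟨hrr, hc, hy⟩⟩
    -- down edge, endpoint (r+1,c), cell Farm / Water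
    · exact ⟨hrr, hc, by
        simp [pvQ, hy]
        rw [pvNbrLoop_char]
        refine Or.inr (Or.inl ⟨by omega, by omega, hc, ?_⟩)
        rw [Nat.add_sub_cancel]
        exact hx⟩
    · exact ⟨hrr, hc, by
        simp [pvQ, hy]
        rw [pvNbrLoop_char]
        refine Or.inr (Or.inl ⟨by omega, by omega, hc, ?_⟩)
        rw [Nat.add_sub_cancel]
        exact hx⟩
  · rintro ⟨ha, hb, hQ⟩
    dsimp only at ha hb
    simp only [pvQ, Bool.and_eq_true, Bool.or_eq_true, beq_iff_eq] at hQ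
    obtain ⟨hcell, hnbr⟩ := hQ
    rcases hcell with hW | hF
    · simp [hW] at hnbr
      rw [pvNbrLoop_char] at hnbr
      rcases hnbr with ⟨h1, h2, h3⟩ | ⟨h1, h2, h3, h4⟩ | ⟨h1, h2, h3⟩ | ⟨h1, h2, h3, h4⟩
      · exact ⟨a, ha, b, hb, Or.inr ⟨h1, (pvOpp_iff _ _).2 (Or.inl ⟨hW, h3⟩), Or.inl rfl⟩⟩
      · have e : a - 1 + 1 = a := by omega
        refine ⟨a - 1, by omega, b, hb, Or.inr ⟨by rw [e]; exact ha, ?_, Or.inr (by rw [e])⟩⟩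
        rw [e]
        exact (pvOpp_iff _ _).2 (Or.inr ⟨h4, hW⟩)
      · exact ⟨a, ha, b, hb, Or.inl ⟨h2, (pvOpp_iff _ _).2 (Or.inl ⟨hW, h3⟩), Or.inl rfl⟩⟩
      · have e : b - 1 + 1 = b := by omega
        refine ⟨a, ha, b - 1, by omega, Or.inl ⟨by rw [e]; exact hb, ?_, Or.inr (by rw [e])⟩⟩
        rw [e]
        exact (pvOpp_iff _ _).2 (Or.inr ⟨h4, hW⟩)
    · by_cases hW : pvAt grid a b = "Water"
      · simp [hW] at hnbr
        rw [pvNbrLoop_char] at hnbr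
        rcases hnbr with ⟨h1, h2, h3⟩ | ⟨h1, h2, h3, h4⟩ | ⟨h1, h2, h3⟩ | ⟨h1, h2, h3, h4⟩
        · exact ⟨a, ha, b, hb, Or.inr ⟨h1, (pvOpp_iff _ _).2 (Or.inl ⟨hW, h3⟩), Or.inl rfl⟩⟩
        · have e : a - 1 + 1 = a := by omega
          refine ⟨a - 1, by omega, b, hb, Or.inr ⟨by rw [e]; exact ha, ?_, Or.inr (by rw [e])⟩⟩
          rw [e]
          exact (pvOpp_iff _ _).2 (Or.inr ⟨h4, hW⟩)
        · exact ⟨a, ha, b, hb, Or.inl ⟨h2, (pvOpp_iff _ _).2 (Or.inl ⟨hW, h3⟩), Or.inl rfl⟩⟩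
        · have e : b - 1 + 1 = b := by omega
          refine ⟨a, ha, b - 1, by omega, Or.inl ⟨by rw [e]; exact hb, ?_, Or.inr (by rw [e])⟩⟩
          rw [e]
          exact (pvOpp_iff _ _).2 (Or.inr ⟨h4, hW⟩)
      · simp [hF] at hnbr
        rw [pvNbrLoop_char] at hnbr
        rcases hnbr with ⟨h1, h2, h3⟩ | ⟨h1, h2, h3, h4⟩ | ⟨h1, h2, h3⟩ | ⟨h1, h2, h3, h4⟩
        · exact ⟨a, ha, b, hb, Or.inr ⟨h1, (pvOpp_iff _ _).2 (Or.inr ⟨hF, h3⟩), Or.inl rfl⟩⟩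
        · have e : a - 1 + 1 = a := by omega
          refine ⟨a - 1, by omega, b, hb, Or.inr ⟨by rw [e]; exact ha, ?_, Or.inr (by rw [e])⟩⟩
          rw [e]
          exact (pvOpp_iff _ _).2 (Or.inl ⟨h4, hF⟩)
        · exact ⟨a, ha, b, hb, Or.inl ⟨h2, (pvOpp_iff _ _).2 (Or.inr ⟨hF, h3⟩), Or.inl rfl⟩⟩
        · have e : b - 1 + 1 = b := by omega
          refine ⟨a, ha, b - 1, by omega, Or.inl ⟨by rw [e]; exact hb, ?_, Or.inr (by rw [e])⟩⟩
          rw [e]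
          exact (pvOpp_iff _ _).2 (Or.inl ⟨h4, hF⟩)

-- ===== VERDICT (by name: the statement is the Claim_ definition above) =====
theorem canalLake_progress_spec : Claim_equal_canalLake_progress := by
  intro grid _ _
  show canalLake_progress grid = canalLake_progress_alt grid
  rw [pvA_eq_count]
  unfold canalLake_progress_alt
  set rows := grid.length with hrows
  set cols := (grid.headD []).length with hcols
  have hmemS := pvMem_scan grid rows cols
  have hnodupS := pvScan_nodup grid rows cols
  set S := (List.range rows).foldl (fun s r =>
      (List.range cols).foldl (fun s c => pvEdgeStep grid rows cols r c s) s)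
      (PySem.Set.empty : PySem.Set (Nat × Nat)) with hS
  have hfilter : ∀ q : Nat × Nat,
      q ∈ S ↔ q ∈ (pvCells rows cols).filter (fun p => pvQ grid rows cols p.1 p.2) := by
    intro q
    rw [hmemS q, pvHit_iff_Q grid rows cols q, List.mem_filter, pvMem_cells]
    tauto
  have hperm : S.Perm ((pvCells rows cols).filter (fun p => pvQ grid rows cols p.1 p.2)) :=
    (List.perm_ext_iff_of_nodup hnodupS ((pvCells_nodup rows cols).filter _)).2 hfilter
  have hlen := hperm.length_eq
  simp only [PySem.Set.len]
  rw [hlen, ← List.countP_eq_length_filter]
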